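-- pv_equiv track=rewrite | github.com/CHANCHALCHAVHAN/Company_Problem-statement-and-its-Solutions | Maximize Task Allocation With Batteries.py | max_tasks_completed
-- ===== SOURCE A (Python) =====
-- def max_tasks_completed(n, m, tasks, batteries):
--     tasks.sort()      # Sort tasks by required energy
--     batteries.sort()  # Sort batteries by power capacity
--
--     task_index = 0  # Pointer for tasks
--     battery_index = 0  # Pointer for batteries
--     completed_tasks = 0  # Count of completed tasks
--
--     while task_index < n and battery_index < m:
--         if tasks[task_index] <= batteries[battery_index]:
--             completed_tasks += 1  # Task can be completed
--             task_index += 1  # Move to next task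
--             battery_index += 1  # Move to next battery
--         else:
--             battery_index += 1  # Find a suitable battery
--
--     return completed_tasks
-- ===== SOURCE B (Python) =====
-- def max_tasks_completed(n, m, tasks, batteries):
--     tasks.sort()
--     batteries.sort()
--     ts = list(reversed(tasks[:max(n, 0)]))
--     bs = list(reversed(batteries[:max(m, 0)]))
--     completed = 0
--     j = 0
--     for t in ts:
--         if j < len(bs) and bs[j] >= t:
--             completed += 1
--             j += 1
--     return completed
-- ===== Notes on version B (the rewrite author's own statement) =====
-- stated objective: alternative
-- what changed: A scans upward with two indices, matching the smallest task against successively larger batteries and skipping too-weak batteries; B slices and reverses the sorted prefixes and runs one for-loop over tasks in DESCENDING order with a single battery counter, pairing the largest remaining battery with the largest feasible task and discarding tasks too large for any remaining battery - the opposite skip decision and a fold instead of a dual-index while loop.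
-- outside the precondition, e.g. on max_tasks_completed(1, 5, [1], [3, 4]): A returns 1, B returns 1
import Mathlib
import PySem

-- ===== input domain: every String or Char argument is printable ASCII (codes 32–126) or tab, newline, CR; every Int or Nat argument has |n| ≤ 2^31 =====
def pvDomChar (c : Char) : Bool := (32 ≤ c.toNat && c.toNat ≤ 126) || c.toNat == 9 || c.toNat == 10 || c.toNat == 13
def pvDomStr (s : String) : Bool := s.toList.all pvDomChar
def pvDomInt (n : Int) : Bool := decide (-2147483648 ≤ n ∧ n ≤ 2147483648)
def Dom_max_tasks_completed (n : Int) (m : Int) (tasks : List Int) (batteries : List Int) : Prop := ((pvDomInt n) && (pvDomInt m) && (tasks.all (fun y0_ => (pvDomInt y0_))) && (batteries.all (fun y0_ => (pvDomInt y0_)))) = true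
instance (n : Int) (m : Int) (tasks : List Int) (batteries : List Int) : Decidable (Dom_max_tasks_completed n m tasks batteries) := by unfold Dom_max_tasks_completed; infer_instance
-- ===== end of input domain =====

-- B replaces A's forward (smallest-task-first, battery-skipping) dual-index while loop by a
-- single descending for-loop over the reversed sorted task prefix with one battery counter
-- (largest battery to largest feasible task) - objective: alternative, same cost.
-- Both A and B sort `tasks` and `batteries` in place; the equivalence proved is about the return
-- value (the in-place sort side effect is identical in A and B).


-- ===== PORT A =====
-- A's while loop: increasing pointers ti (tasks) and bi (batteries); bi advances every iteration,
-- so the loop terminates on (m - bi).toNat.  An out-of-range index (Python IndexError) is the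
-- `none` match arm, excluded by Pre_.
def pvLoopA (ts bs : List Int) (n m ti bi cnt : Int) : Int :=
  if _h : ti < n ∧ bi < m then
    match PySem.List.pyGet? ts ti, PySem.List.pyGet? bs bi with
    | some t, some b =>
        if t ≤ b then pvLoopA ts bs n m (ti + 1) (bi + 1) (cnt + 1)
        else pvLoopA ts bs n m ti (bi + 1) cnt
    | _, _ => cnt
  else cnt
termination_by (m - bi).toNat
decreasing_by all_goals omega

def max_tasks_completed (n : Int) (m : Int) (tasks : List Int) (batteries : List Int) : Int :=
  pvLoopA (PySem.List.sorted tasks (fun x => x) false) (PySem.List.sorted batteries (fun x => x) false) n m 0 0 0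

-- ===== PORT B =====
-- B: ts = reversed(tasks[:max(n,0)]), bs = reversed(batteries[:max(m,0)]); then one for-loop
-- over ts carrying (completed, j): `if j < len(bs) and bs[j] >= t: completed += 1; j += 1`.
-- j starts at 0 and only increments, so it is carried as a Nat and the in-range access bs[j]
-- is the guarded list access.
def max_tasks_completed_alt (n : Int) (m : Int) (tasks : List Int) (batteries : List Int) : Int :=
  let ts := (PySem.List.slice (PySem.List.sorted tasks (fun x => x) false) none (some (max n 0))).reverse
  let bs := (PySem.List.slice (PySem.List.sorted batteries (fun x => x) false) none (some (max m 0))).reverse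
  (ts.foldl
    (fun (st : Int × Nat) t =>
      if h : st.2 < bs.length then
        if bs[st.2] ≥ t then (st.1 + 1, st.2 + 1) else st
      else st)
    (0, 0)).1

-- ===== PRECONDITION & SPEC =====
-- A raises IndexError when a pointer passes the end of its list before the loop exits; which
-- inputs with n > len(tasks) or m > len(batteries) reach that is data-dependent, so Pre_ takes
-- the closed-form safe region (each bound within its list's length unless the other bound makes
-- the loop empty).  This also excludes a few inputs on which A returns because the loop exits
-- early (e.g. n=1, m=5, tasks=[1], batteries=[3,4] returns 1); B returns the same value on those,
-- but equality is only claimed inside Pre_.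
def Pre_max_tasks_completed (n : Int) (m : Int) (tasks : List Int) (batteries : List Int) : Prop :=
  (n ≤ (tasks.length : Int) ∨ m ≤ 0) ∧ (m ≤ (batteries.length : Int) ∨ n ≤ 0)
instance (n : Int) (m : Int) (tasks : List Int) (batteries : List Int) : Decidable (Pre_max_tasks_completed n m tasks batteries) := by unfold Pre_max_tasks_completed; infer_instance

def pvWitness_max_tasks_completed : Int × Int × List Int × List Int := (3, 2, [4, 1, 3], [2, 5])

def Spec_max_tasks_completed (n : Int) (m : Int) (tasks : List Int) (batteries : List Int) (out : Int) : Prop := out = max_tasks_completed_alt n m tasks batteries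
instance (n : Int) (m : Int) (tasks : List Int) (batteries : List Int) (out : Int) : Decidable (Spec_max_tasks_completed n m tasks batteries out) := by unfold Spec_max_tasks_completed; infer_instance

-- ===== CLAIM (what is proved, stated in full; the proofs are below) =====
def Claim_equal_max_tasks_completed : Prop := ∀ (n : Int) (m : Int) (tasks : List Int) (batteries : List Int), Dom_max_tasks_completed n m tasks batteries → Pre_max_tasks_completed n m tasks batteries → Spec_max_tasks_completed n m tasks batteries (max_tasks_completed n m tasks batteries)

-- ===== LEMMAS AND PROOFS =====
-- pvF: A's greedy as a structural recursion on ascending lists (smallest task vs smallest battery).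
-- pvG: B's greedy as a structural recursion on DESCENDING lists (largest vs largest).
def pvF : List Int → List Int → Int
  | [], _ => 0
  | _ :: _, [] => 0
  | t :: ts, b :: bs => if t ≤ b then 1 + pvF ts bs else pvF (t :: ts) bs

theorem pvF_nil_right (ts : List Int) : pvF ts [] = 0 := by cases ts <;> simp [pvF]

theorem pvF_append_big (t : Int) (bs : List Int) (hb : ∀ x ∈ bs, x < t) :
    ∀ ts : List Int, pvF (ts ++ [t]) bs = pvF ts bs := by
  induction bs with
  | nil => intro ts; simp [pvF_nil_right]
  | cons b0 bs' ih =>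
      intro ts
      have hb0 : b0 < t := hb b0 (by simp)
      have hb' : ∀ x ∈ bs', x < t := fun x hx => hb x (by simp [hx])
      cases ts with
      | nil =>
          simp only [List.nil_append, pvF, if_neg (by omega : ¬ t ≤ b0)]
          have := ih hb' []
          simpa [pvF] using this
      | cons t0 ts' =>
          by_cases h : t0 ≤ b0
          · simp only [List.cons_append, pvF, if_pos h]
            rw [ih hb' ts']
          · simp only [List.cons_append, pvF, if_neg h]
            have := ih hb' (t0 :: ts')
            simpa using this

theorem pvF_append_match (t b : Int) (ht : t ≤ b) :
    ∀ (bs ts : List Int), (∀ x ∈ ts, x ≤ t) → pvF (ts ++ [t]) (bs ++ [b]) = pvF ts bs + 1 := by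
  intro bs
  induction bs with
  | nil =>
      intro ts hts
      cases ts with
      | nil => simp [pvF, ht]
      | cons t0 ts' =>
          have h0 : t0 ≤ b := le_trans (hts t0 (by simp)) ht
          simp only [List.cons_append, List.nil_append, pvF, if_pos h0, pvF_nil_right]
          omega
  | cons b0 bs' ih =>
      intro ts hts
      cases ts with
      | nil =>
          simp only [List.nil_append, List.cons_append, pvF]
          by_cases h : t ≤ b0
          · simp [if_pos h]
          · simp only [if_neg h]
            have := ih [] (by simp)
            simpa [pvF] using this
      | cons t0 ts' =>
          have hts' : ∀ x ∈ ts', x ≤ t := fun x hx => hts x (by simp [hx])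
          by_cases h : t0 ≤ b0
          · simp only [List.cons_append, pvF, if_pos h]
            rw [ih ts' hts']
            omega
          · simp only [List.cons_append, pvF, if_neg h]
            exact ih (t0 :: ts') hts

def pvG : List Int → List Int → Int
  | [], _ => 0
  | _ :: _, [] => 0
  | t :: ts, b :: bs => if t ≤ b then 1 + pvG ts bs else pvG ts (b :: bs)

theorem pvG_nil_right (ts : List Int) : pvG ts [] = 0 := by cases ts <;> simp [pvG]

theorem pvF_eq_pvG (ts : List Int) (hts : ts.Pairwise (· ≤ ·)) :
    ∀ bs : List Int, bs.Pairwise (· ≤ ·) → pvF ts bs = pvG ts.reverse bs.reverse := by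
  induction ts using List.reverseRecOn with
  | nil => intro bs _; simp [pvF, pvG]
  | append_singleton ts₀ t ih =>
      have hts₀ : ts₀.Pairwise (· ≤ ·) := hts.sublist (List.sublist_append_left _ _)
      have htop : ∀ x ∈ ts₀, x ≤ t := by
        have := (List.pairwise_append.1 hts).2.2
        intro x hx; exact this x hx t (by simp)
      intro bs hbs
      induction bs using List.reverseRecOn with
      | nil => simp [pvF_nil_right, pvG_nil_right]
      | append_singleton bs₀ b _ =>
          have hbs₀ : bs₀.Pairwise (· ≤ ·) := hbs.sublist (List.sublist_append_left _ _)
          have hbtop : ∀ x ∈ bs₀, x ≤ b := by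
            have := (List.pairwise_append.1 hbs).2.2
            intro x hx; exact this x hx b (by simp)
          by_cases h : t ≤ b
          · rw [pvF_append_match t b h bs₀ ts₀ htop]
            simp only [List.reverse_append, List.reverse_singleton, List.singleton_append, pvG,
              if_pos h]
            rw [ih hts₀ bs₀ hbs₀]; omega
          · have hb : ∀ x ∈ bs₀ ++ [b], x < t := by
              intro x hx
              rcases List.mem_append.1 hx with hx | hx
              · exact lt_of_le_of_lt (hbtop x hx) (by omega)
              · simp at hx; omega
            rw [pvF_append_big t (bs₀ ++ [b]) hb ts₀]
            simp only [List.reverse_append, List.reverse_singleton, List.singleton_append, pvG,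
              if_neg h]
            have := ih hts₀ (bs₀ ++ [b]) hbs
            simpa using this

-- A's index loop computes pvF on the remaining slices.
theorem pvLoopA_eq (ts bs : List Int) (n m : Int) (hn : n ≤ (ts.length : Int)) (hm : m ≤ (bs.length : Int)) :
    ∀ (ti bi cnt : Int), 0 ≤ ti → 0 ≤ bi →
      pvLoopA ts bs n m ti bi cnt =
        cnt + pvF ((ts.take n.toNat).drop ti.toNat) ((bs.take m.toNat).drop bi.toNat) := by
  intro ti bi cnt
  induction ti, bi, cnt using pvLoopA.induct ts bs n m with
  | case1 ti bi cnt h t b hgb hgt hle ih =>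
      intro hti hbi
      obtain ⟨h1, h2⟩ := h
      have hts' : ts[ti.toNat] = t := by
        rw [PySem.List.pyGet?_of_nonneg _ hti, List.getElem?_eq_getElem (by omega)] at hgt
        exact (Option.some.inj hgt)
      have hbs' : bs[bi.toNat] = b := by
        rw [PySem.List.pyGet?_of_nonneg _ hbi, List.getElem?_eq_getElem (by omega)] at hgb
        exact (Option.some.inj hgb)
      have htss : (ts.take n.toNat).drop ti.toNat = t :: (ts.take n.toNat).drop (ti.toNat + 1) := by
        have h' : ti.toNat < (ts.take n.toNat).length := by simp; omega
        rw [List.drop_eq_getElem_cons h', List.getElem_take, hts']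
      have hbss : (bs.take m.toNat).drop bi.toNat = b :: (bs.take m.toNat).drop (bi.toNat + 1) := by
        have h' : bi.toNat < (bs.take m.toNat).length := by simp; omega
        rw [List.drop_eq_getElem_cons h', List.getElem_take, hbs']
      rw [pvLoopA, dif_pos ⟨h1, h2⟩]
      simp only [hgt, hgb, if_pos hle]
      rw [ih (by omega) (by omega), htss, hbss]
      simp only [pvF, if_pos hle]
      have e1 : (ti + 1).toNat = ti.toNat + 1 := by omega
      have e2 : (bi + 1).toNat = bi.toNat + 1 := by omega
      rw [e1, e2]; omega
  | case2 ti bi cnt h t b hgb hgt hle ih =>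
      intro hti hbi
      obtain ⟨h1, h2⟩ := h
      have hts' : ts[ti.toNat] = t := by
        rw [PySem.List.pyGet?_of_nonneg _ hti, List.getElem?_eq_getElem (by omega)] at hgt
        exact (Option.some.inj hgt)
      have hbs' : bs[bi.toNat] = b := by
        rw [PySem.List.pyGet?_of_nonneg _ hbi, List.getElem?_eq_getElem (by omega)] at hgb
        exact (Option.some.inj hgb)
      have htss : (ts.take n.toNat).drop ti.toNat = t :: (ts.take n.toNat).drop (ti.toNat + 1) := by
        have h' : ti.toNat < (ts.take n.toNat).length := by simp; omega
        rw [List.drop_eq_getElem_cons h', List.getElem_take, hts']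
      have hbss : (bs.take m.toNat).drop bi.toNat = b :: (bs.take m.toNat).drop (bi.toNat + 1) := by
        have h' : bi.toNat < (bs.take m.toNat).length := by simp; omega
        rw [List.drop_eq_getElem_cons h', List.getElem_take, hbs']
      rw [pvLoopA, dif_pos ⟨h1, h2⟩]
      simp only [hgt, hgb, if_neg hle]
      rw [ih (by omega) (by omega), htss, hbss]
      simp only [pvF, if_neg hle]
      have e2 : (bi + 1).toNat = bi.toNat + 1 := by omega
      rw [e2]
  | case3 ti bi cnt h hne =>
      intro hti hbi
      obtain ⟨h1, h2⟩ := h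
      exfalso
      exact hne ts[ti.toNat] bs[bi.toNat]
        (by rw [PySem.List.pyGet?_of_nonneg _ hti]; exact List.getElem?_eq_getElem (by omega))
        (by rw [PySem.List.pyGet?_of_nonneg _ hbi]; exact List.getElem?_eq_getElem (by omega))
  | case4 ti bi cnt h =>
      intro hti hbi
      rw [pvLoopA, dif_neg h]
      have : n.toNat ≤ ti.toNat ∨ m.toNat ≤ bi.toNat := by omega
      rcases this with h' | h'
      · rw [List.drop_eq_nil_of_le (by simp; omega)]
        simp [pvF]
      · rw [List.drop_eq_nil_of_le (as := bs.take m.toNat) (by simp; omega)]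
        simp [pvF_nil_right]

-- B's for-loop with the (completed, j) accumulator computes pvG against the suffix bs.drop j.
theorem pvFoldB_eq (bs : List Int) :
    ∀ (ts : List Int) (c : Int) (j : Nat),
      (ts.foldl
        (fun (st : Int × Nat) t =>
          if h : st.2 < bs.length then
            if bs[st.2] ≥ t then (st.1 + 1, st.2 + 1) else st
          else st)
        (c, j)).1 = c + pvG ts (bs.drop j) := by
  intro ts
  induction ts with
  | nil => intro c j; simp [pvG]
  | cons t ts ih =>
      intro c j
      by_cases hj : j < bs.length
      · have hdrop : bs.drop j = bs[j] :: bs.drop (j + 1) := List.drop_eq_getElem_cons hj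
        by_cases hle : t ≤ bs[j]
        · simp only [List.foldl_cons, dif_pos hj, if_pos (by omega : bs[j] ≥ t)]
          rw [ih (c + 1) (j + 1), hdrop]
          simp only [pvG, if_pos hle]; omega
        · simp only [List.foldl_cons, dif_pos hj, if_neg (by omega : ¬ bs[j] ≥ t)]
          rw [ih c j, hdrop]
          simp only [pvG, if_neg hle]
      · have hdrop : bs.drop j = [] := List.drop_eq_nil_of_le (by omega)
        simp only [List.foldl_cons, dif_neg hj]
        rw [ih c j, hdrop]
        simp [pvG, pvG_nil_right]

-- ===== VERDICT (by name: the statement is the Claim_ definition above) =====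
theorem max_tasks_completed_spec : Claim_equal_max_tasks_completed := by
  intro n m tasks batteries _ hpre
  obtain ⟨hp1, hp2⟩ := hpre
  unfold Spec_max_tasks_completed max_tasks_completed max_tasks_completed_alt
  set ts := PySem.List.sorted tasks (fun x => x) false with hts
  set bs := PySem.List.sorted batteries (fun x => x) false with hbs
  have hlts : ts.length = tasks.length := PySem.List.length_sorted ..
  have hlbs : bs.length = batteries.length := PySem.List.length_sorted ..
  have hslt : PySem.List.slice ts none (some (max n 0)) = ts.take (max n 0).toNat :=
    PySem.List.slice_to _ (le_max_right _ _)
  have hslb : PySem.List.slice bs none (some (max m 0)) = bs.take (max m 0).toNat :=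
    PySem.List.slice_to _ (le_max_right _ _)
  simp only [hslt, hslb, pvFoldB_eq, List.drop_zero, zero_add]
  by_cases hn0 : n ≤ 0
  · rw [pvLoopA, dif_neg (by omega)]
    have : (max n 0).toNat = 0 := by omega
    rw [this]
    simp [pvG]
  by_cases hm0 : m ≤ 0
  · rw [pvLoopA, dif_neg (by omega)]
    have : (max m 0).toNat = 0 := by omega
    rw [this]
    simp [pvG_nil_right]
  have hn : n ≤ (ts.length : Int) := by rw [hlts]; omega
  have hm : m ≤ (bs.length : Int) := by rw [hlbs]; omega
  have hsts : ts.Pairwise (· ≤ ·) := PySem.List.sorted_pairwise ..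
  have hsbs : bs.Pairwise (· ≤ ·) := PySem.List.sorted_pairwise ..
  rw [pvLoopA_eq ts bs n m hn hm 0 0 0 (by omega) (by omega)]
  have e1 : (max n 0).toNat = n.toNat := by omega
  have e2 : (max m 0).toNat = m.toNat := by omega
  rw [e1, e2]
  simp only [Int.toNat_zero, List.drop_zero, zero_add]
  rw [pvF_eq_pvG (ts.take n.toNat) (hsts.sublist (List.take_sublist _ _)) (bs.take m.toNat)
      (hsbs.sublist (List.take_sublist _ _))]
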